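-- pv_equiv track=rewrite | github.com/rohujin97/Algorithm_Python | test/0911/AM/2.py | solution
-- ===== SOURCE A (Python) =====
-- def solution(research, n, k):
--     answer = ''
--     day = len(research)
--     alpha = [[0 for _ in range(day)] for _ in range(26)]
--
--     for i in range(day):
--         for alp in research[i]:
--             x = ord(alp) - 97
--             alpha[x][i] += 1
--
--     issue = [[] for _ in range(day)]
--     # 매일 k 번 이상 검색
--     for i in range(day):
--         for j in range(26):
--             if k <= alpha[j][i]:
--                 issue[i].append(j)
--     t = 2*n*k
--
--     final = [[]for _ in range(day-n+1)]
--     #n일동안 총합이 t보다 크거나 같은지 확인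
--     for i in range(day-n+1):
--         for j in range(len(issue[i])):
--             if sum(alpha[issue[i][j]][i:i+n]) >= t:
--                 final[i].append(issue[i][j])
--
--     total = [0]*26
--     # 최고의 이슈 검색어 뽑기
--     for i in range(len(final)):
--         for j in range(len(final[i])):
--             total[final[i][j]] += 1
--     if sum(total) == 0:
--         answer = 'None'
--     else:
--         answer = chr(total.index(max(total))+97)
--     return answer
-- ===== SOURCE B (Python) =====
-- def solution(research, n, k):
--     day = len(research)
--     prefix = [[0] * 26]            # prefix[i][c] = occurrences of letter c in research[:i]
--     for s in research:
--         col = prefix[-1][:]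
--         for x in s:
--             col[ord(x) - 97] += 1
--         prefix.append(col)
--     t = 2 * n * k
--     total = [0] * 26
--     for i in range(day - n + 1):
--         for c in range(26):
--             base = prefix[i][c]
--             if prefix[i + 1][c] - base >= k and prefix[i + n][c] - base >= t:
--                 total[c] += 1
--     if sum(total) == 0:
--         return 'None'
--     return chr(total.index(max(total)) + 97)
-- ===== Notes on version B (the rewrite author's own statement) =====
-- stated objective: alternative
-- what changed: B replaces A's 26xday count matrix plus per-window slice-and-sum by per-day cumulative (prefix) letter counts built in one pass, so each window total is a single subtraction instead of A's per-letter slice over the n-day window.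
import Mathlib
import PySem

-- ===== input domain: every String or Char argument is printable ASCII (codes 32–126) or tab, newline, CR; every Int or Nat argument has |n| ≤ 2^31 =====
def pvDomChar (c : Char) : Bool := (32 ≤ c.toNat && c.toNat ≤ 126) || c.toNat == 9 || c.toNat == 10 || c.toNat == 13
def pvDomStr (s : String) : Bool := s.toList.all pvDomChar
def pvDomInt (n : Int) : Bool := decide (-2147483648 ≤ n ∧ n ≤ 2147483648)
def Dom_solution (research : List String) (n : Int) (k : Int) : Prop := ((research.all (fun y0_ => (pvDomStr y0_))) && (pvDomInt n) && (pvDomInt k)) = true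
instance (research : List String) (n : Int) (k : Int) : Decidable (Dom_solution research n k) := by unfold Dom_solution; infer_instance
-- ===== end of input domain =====

-- B replaces A's per-window column slicing over a 26×day count matrix by per-day cumulative
-- (prefix) letter counts, so each window total is one subtraction instead of a slice-and-sum.

-- `xs[x] = …` index into a list of length `len` as Python resolves it (negative = from the end;
-- in range under Pre_, where both Pythons' `ord(ch) - 97` lies in [-26, 25])
def pvPyIdx (len : Nat) (x : Int) : Nat := if x < 0 then (x + len).toNat else x.toNat

-- ===== PORT A =====
-- 2-D list read `a[x][i]` and the statement `a[x][i] += 1` (indices in range under Pre_)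
def pvGet2 (a : List (List Int)) (x i : Nat) : Int := (a.getD x []).getD i 0
def pvInc2 (a : List (List Int)) (x i : Nat) : List (List Int) :=
  a.set x ((a.getD x []).set i ((a.getD x []).getD i 0 + 1))

-- `for alp in research[i]: alpha[ord(alp)-97][i] += 1`
def pvInner (i : Nat) (g : List (List Int)) (cs : List Char) : List (List Int) :=
  cs.foldl (fun a alp => pvInc2 a (pvPyIdx 26 ((alp.toNat : Int) - 97)) i) g

def pvAlpha (research : List String) : List (List Int) :=
  (List.range research.length).foldl
    (fun a i => pvInner i a (research.getD i "").toList)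
    (List.replicate 26 (List.replicate research.length 0))

def pvIssue (alpha : List (List Int)) (k : Int) (day : Nat) : List (List Nat) :=
  (List.range day).map (fun i =>
    (List.range 26).foldl (fun acc j => if k ≤ pvGet2 alpha j i then acc ++ [j] else acc) [])

def pvFinal (alpha : List (List Int)) (issue : List (List Nat)) (t n : Int) (day : Nat) : List (List Nat) :=
  (PySem.List.pyRange 0 ((day : Int) - n + 1) 1).map (fun i =>
    (PySem.List.pyRange 0 (((issue.getD i.toNat []).length : Int)) 1).foldl
      (fun acc j =>
        (fun acc x =>
          if t ≤ (PySem.List.slice (alpha.getD x []) (some i) (some (i + n))).sum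
          then acc ++ [x] else acc)
        acc (PySem.List.pyGetD (issue.getD i.toNat []) j 0)) [])

-- shared tail of BOTH Pythons: `if sum(total)==0: 'None' else chr(total.index(max(total))+97)`
def pvAnswer (total : List Int) : String :=
  if total.sum = 0 then "None"
  else
    match PySem.List.max? total (fun y => y) with
    | none => ""
    | some m =>
      match PySem.List.index? total m with
      | none => ""
      | some idx => String.ofList [Char.ofNat (idx + 97)]

def solution (research : List String) (n : Int) (k : Int) : String :=
  let day := research.length
  let alpha := pvAlpha research
  let issue := pvIssue alpha k day
  let t := 2 * n * k
  let final := pvFinal alpha issue t n day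
  let total := final.foldl
    (fun tot row => row.foldl (fun tot c => tot.set c (tot.getD c 0 + 1)) tot)
    (List.replicate 26 0)
  pvAnswer total

-- ===== PORT B =====
-- prefix[i][c] = occurrences of letter c in research[:i]; `col[ord(x)-97] += 1`
def pvPrefix (research : List String) : List (List Int) :=
  research.foldl
    (fun pref s =>
      pref ++ [s.toList.foldl
        (fun col x =>
          col.set (pvPyIdx 26 ((x.toNat : Int) - 97))
            (col.getD (pvPyIdx 26 ((x.toNat : Int) - 97)) 0 + 1))
        (pref.getLastD (List.replicate 26 0))])
    [List.replicate 26 0]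

def solution_alt (research : List String) (n : Int) (k : Int) : String :=
  let day := research.length
  let pref := pvPrefix research
  let t := 2 * n * k
  let total := (PySem.List.pyRange 0 ((day : Int) - n + 1) 1).foldl
    (fun tot i =>
      (List.range 26).foldl (fun tot c =>
        let base := (pref.getD i.toNat []).getD c 0
        if k ≤ (pref.getD (i.toNat + 1) []).getD c 0 - base ∧
           t ≤ (pref.getD (i + n).toNat []).getD c 0 - base
        then tot.set c (tot.getD c 0 + 1) else tot) tot)
    (List.replicate 26 0)
  pvAnswer total

-- ===== PRECONDITION & SPEC =====
-- Exactly the inputs on which A returns: for n ≤ 0 A always raises IndexError (it reads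
-- issue[day]), and any character outside 'G'..'z' makes ord(ch)-97 fall outside [-26, 25],
-- an IndexError on the 26-row table.  (B raises on exactly the same inputs.)
def Pre_solution (research : List String) (n : Int) (k : Int) : Prop :=
  1 ≤ n ∧ research.all (fun s => s.toList.all (fun ch => 71 ≤ ch.toNat && ch.toNat ≤ 122)) = true
instance (research : List String) (n : Int) (k : Int) : Decidable (Pre_solution research n k) := by
  unfold Pre_solution; infer_instance

def pvWitness_solution : List String × Int × Int := (["aa", "ab"], 1, 1)

def Spec_solution (research : List String) (n : Int) (k : Int) (out : String) : Prop := out = solution_alt research n k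
instance (research : List String) (n : Int) (k : Int) (out : String) : Decidable (Spec_solution research n k out) := by unfold Spec_solution; infer_instance

-- ===== CLAIM (what is proved, stated in full; the proofs are below) =====
def Claim_equal_solution : Prop := ∀ (research : List String) (n : Int) (k : Int), Dom_solution research n k → Pre_solution research n k → Spec_solution research n k (solution research n k)

-- ===== LEMMAS AND PROOFS =====

-- occurrences of the c-th lowercase letter in s, and their running (prefix) sums
def pvCnt (c : Nat) (s : String) : Int :=
  (s.toList.countP (fun ch => pvPyIdx 26 ((ch.toNat : Int) - 97) == c) : Int)
def pvS (research : List String) (c m : Nat) : Int := ((research.take m).map (pvCnt c)).sum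

def pvCharsOk (research : List String) : Prop :=
  ∀ s ∈ research, ∀ ch ∈ s.toList, 71 ≤ ch.toNat ∧ ch.toNat ≤ 122

def pvShape (g : List (List Int)) (d : Nat) : Prop :=
  g.length = 26 ∧ ∀ r ∈ g, r.length = d

lemma pvInc2_shape {g d} (h : pvShape g d) (x i : Nat) : pvShape (pvInc2 g x i) d := by
  obtain ⟨h1, h2⟩ := h
  by_cases hx : x < g.length
  · refine ⟨by simp [pvInc2, h1], ?_⟩
    intro r hr
    rcases List.mem_or_eq_of_mem_set hr with hm | rfl
    · exact h2 r hm
    · rw [List.length_set]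
      exact h2 _ (List.getD_eq_getElem g [] hx ▸ List.getElem_mem hx)
  · rw [pvInc2, List.set_eq_of_length_le (by omega)]
    exact ⟨h1, h2⟩

lemma pvGet2_inc {g d} (h : pvShape g d) {x c i j : Nat} (hc : c < 26) (hj : j < d)
    (hx : x < 26) (hi : i < d) :
    pvGet2 (pvInc2 g x i) c j = pvGet2 g c j + if x = c ∧ i = j then 1 else 0 := by
  obtain ⟨h1, h2⟩ := h
  have hxl : x < g.length := by omega
  have hcl : c < g.length := by omega
  have hrl : (g.getD x []).length = d :=
    h2 _ (List.getD_eq_getElem g [] hxl ▸ List.getElem_mem hxl)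
  unfold pvInc2 pvGet2
  by_cases hxc : x = c
  · subst hxc
    rw [List.getD_eq_getElem _ [] (by simpa using hxl), List.getElem_set_self (by simpa using hxl)]
    by_cases hij : i = j
    · subst hij
      rw [List.getD_eq_getElem _ 0 (by simp only [List.length_set]; omega), List.getElem_set_self (by simp only [List.length_set]; omega)]
      simp
    · rw [List.getD_eq_getElem _ 0 (by simp only [List.length_set]; omega), List.getElem_set_ne hij (by simp only [List.length_set]; omega),
        ← List.getD_eq_getElem _ 0 (show j < (g.getD x []).length by omega)]
      simp [hij]
  · rw [List.getD_eq_getElem _ [] (by simpa using hcl), List.getElem_set_ne hxc (by simpa using hcl),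
      ← List.getD_eq_getElem g [] hcl]
    simp [hxc]

lemma pvInner_shape {g d} (h : pvShape g d) (i : Nat) (cs : List Char) :
    pvShape (pvInner i g cs) d := by
  induction cs generalizing g with
  | nil => exact h
  | cons a t ih => exact ih (pvInc2_shape h _ _)

lemma pvInner_get2 {g d} (h : pvShape g d) {i c j : Nat} (hc : c < 26) (hj : j < d) (hi : i < d)
    (cs : List Char) (hcs : ∀ ch ∈ cs, 71 ≤ ch.toNat ∧ ch.toNat ≤ 122) :
    pvGet2 (pvInner i g cs) c j
      = pvGet2 g c j + if i = j then (cs.countP (fun ch => pvPyIdx 26 ((ch.toNat : Int) - 97) == c) : Int) else 0 := by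
  induction cs generalizing g with
  | nil => simp [pvInner]
  | cons a t ih =>
    have ha := hcs a (by simp)
    have hx : pvPyIdx 26 ((a.toNat : Int) - 97) < 26 := by
      rw [pvPyIdx]
      split <;> omega
    have hstep : pvInner i g (a :: t)
        = pvInner i (pvInc2 g (pvPyIdx 26 ((a.toNat : Int) - 97)) i) t := rfl
    rw [hstep, ih (pvInc2_shape h _ _) (fun ch hch => hcs ch (by simp [hch])),
      pvGet2_inc h hc hj hx hi]
    by_cases hij : i = j
    · subst hij
      simp only [List.countP_cons]
      by_cases hac : pvPyIdx 26 ((a.toNat : Int) - 97) = c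
      · simp [hac]
        ring
      · simp [hac]
    · simp [hij]

lemma pvAlphaAux (research : List String) (hl : pvCharsOk research) (m : Nat)
    (hm : m ≤ research.length) :
    pvShape ((List.range m).foldl (fun a i => pvInner i a (research.getD i "").toList)
        (List.replicate 26 (List.replicate research.length 0))) research.length ∧
      ∀ c < 26, ∀ j < research.length,
        pvGet2 ((List.range m).foldl (fun a i => pvInner i a (research.getD i "").toList)
          (List.replicate 26 (List.replicate research.length 0))) c j
          = if j < m then pvCnt c (research.getD j "") else 0 := by
  induction m with
  | zero =>
    refine ⟨⟨by simp, ?_⟩, ?_⟩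
    · intro r hr
      rw [List.eq_of_mem_replicate hr, List.length_replicate]
    · intro c hc j hj
      simp only [pvGet2, List.range_zero, List.foldl_nil]
      rw [List.getD_replicate _ hc, List.getD_replicate _ hj]
      simp
  | succ m ih =>
    obtain ⟨ihs, ihv⟩ := ih (by omega)
    rw [List.range_succ, List.foldl_append, List.foldl_cons, List.foldl_nil]
    have hmem : research.getD m "" ∈ research := by
      rw [List.getD_eq_getElem research "" (by omega)]
      exact List.getElem_mem _
    have hcs : ∀ ch ∈ (research.getD m "").toList, 71 ≤ ch.toNat ∧ ch.toNat ≤ 122 :=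
      fun ch hch => hl _ hmem ch hch
    refine ⟨pvInner_shape ihs _ _, ?_⟩
    intro c hc j hj
    rw [pvInner_get2 ihs hc hj (by omega) _ hcs, ihv c hc j hj,
      show ((((research.getD m "").toList.countP
          (fun ch => pvPyIdx 26 ((ch.toNat : Int) - 97) == c)) : Nat) : Int)
        = pvCnt c (research.getD m "") from rfl]
    by_cases hjm : j < m
    · simp [hjm, show j < m + 1 by omega, show ¬ (m = j) by omega]
    · by_cases hje : m = j
      · subst hje
        simp [pvCnt]
      · simp [hjm, show ¬ (j < m + 1) by omega, hje]

lemma pvAlpha_shape (research : List String) (hl : pvCharsOk research) :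
    pvShape (pvAlpha research) research.length :=
  (pvAlphaAux research hl research.length le_rfl).1

lemma pvAlpha_get2 (research : List String) (hl : pvCharsOk research) {c j : Nat}
    (hc : c < 26) (hj : j < research.length) :
    pvGet2 (pvAlpha research) c j = pvCnt c (research.getD j "") := by
  rw [show pvAlpha research = (List.range research.length).foldl
      (fun a i => pvInner i a (research.getD i "").toList)
      (List.replicate 26 (List.replicate research.length 0)) from rfl,
    (pvAlphaAux research hl research.length le_rfl).2 c hc j hj, if_pos hj]

lemma pvAlpha_row (research : List String) (hl : pvCharsOk research) {c : Nat} (hc : c < 26) :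
    (pvAlpha research).getD c [] = research.map (pvCnt c) := by
  obtain ⟨h1, h2⟩ := pvAlpha_shape research hl
  have hcl : c < (pvAlpha research).length := by omega
  have hrl : ((pvAlpha research).getD c []).length = research.length :=
    h2 _ (by rw [List.getD_eq_getElem _ [] hcl]; exact List.getElem_mem hcl)
  apply List.ext_getElem (by rw [hrl, List.length_map])
  intro j hj1 hj2
  have hj : j < research.length := by omega
  have := pvAlpha_get2 research hl hc hj
  rw [pvGet2, List.getD_eq_getElem _ 0 (by omega), List.getD_eq_getElem research "" hj] at this
  rw [this, List.getElem_map]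

lemma pvPrefix_append (l : List String) (s : String) :
    pvPrefix (l ++ [s]) = pvPrefix l
      ++ [s.toList.foldl
            (fun col x =>
              col.set (pvPyIdx 26 ((x.toNat : Int) - 97))
                (col.getD (pvPyIdx 26 ((x.toNat : Int) - 97)) 0 + 1))
            ((pvPrefix l).getLastD (List.replicate 26 0))] := by
  rw [pvPrefix, List.foldl_append]
  rfl

lemma pvPrefix_length (research : List String) :
    (pvPrefix research).length = research.length + 1 := by
  induction research using List.reverseRecOn with
  | nil => rfl
  | append_singleton l s ih => rw [pvPrefix_append, List.length_append, ih, List.length_append]; rfl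

-- one day's counting loop `col[ord(x)-97] += 1`
lemma pvCol_length (cs : List Char) (col : List Int) :
    (cs.foldl
      (fun col x =>
        col.set (pvPyIdx 26 ((x.toNat : Int) - 97))
          (col.getD (pvPyIdx 26 ((x.toNat : Int) - 97)) 0 + 1)) col).length = col.length := by
  induction cs generalizing col with
  | nil => rfl
  | cons a t ih => rw [List.foldl_cons, ih, List.length_set]

lemma pvCol_getD (cs : List Char) (col : List Int) {c : Nat} (hc : c < col.length) :
    (cs.foldl
      (fun col x =>
        col.set (pvPyIdx 26 ((x.toNat : Int) - 97))
          (col.getD (pvPyIdx 26 ((x.toNat : Int) - 97)) 0 + 1)) col).getD c 0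
      = col.getD c 0 + (cs.countP (fun ch => pvPyIdx 26 ((ch.toNat : Int) - 97) == c) : Int) := by
  induction cs generalizing col with
  | nil => simp
  | cons a t ih =>
    rw [List.foldl_cons, List.countP_cons, ih _ (by rw [List.length_set]; exact hc)]
    by_cases hac : pvPyIdx 26 ((a.toNat : Int) - 97) = c
    · rw [hac, List.getD_eq_getElem _ 0 (by simpa using hc), List.getElem_set_self (by simpa using hc),
        List.getD_eq_getElem _ 0 hc]
      simp
      ring
    · rw [List.getD_eq_getElem _ 0 (by simpa using hc), List.getElem_set_ne hac (by simpa using hc),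
        ← List.getD_eq_getElem col 0 hc]
      simp [hac]

lemma pvLastCol (l : List String) :
    (pvPrefix l).getLastD (List.replicate 26 0) = (pvPrefix l).getD l.length (List.replicate 26 0) := by
  rw [List.getLastD_eq_getLast?, List.getLast?_eq_getElem?, List.getD, pvPrefix_length]
  norm_num

lemma pvPrefix_cols (research : List String) : ∀ col ∈ pvPrefix research, col.length = 26 := by
  induction research using List.reverseRecOn with
  | nil =>
    intro col hcol
    rw [show pvPrefix [] = [List.replicate 26 0] from rfl, List.mem_singleton] at hcol
    rw [hcol]
    simp
  | append_singleton l s ih =>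
    intro col hcol
    rw [pvPrefix_append] at hcol
    rcases List.mem_append.mp hcol with h | h
    · exact ih col h
    · rw [List.mem_singleton.mp h, pvCol_length, pvLastCol]
      have hlt : l.length < (pvPrefix l).length := by rw [pvPrefix_length]; omega
      rw [List.getD_eq_getElem _ _ hlt]
      exact ih _ (List.getElem_mem hlt)

lemma pvPrefix_getD (research : List String) (c : Nat) (hc : c < 26) {m : Nat}
    (hm : m ≤ research.length) :
    ((pvPrefix research).getD m []).getD c 0 = pvS research c m := by
  induction research using List.reverseRecOn generalizing m with
  | nil =>
    have h0 : m = 0 := by simp at hm; omega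
    subst h0
    rw [show (pvPrefix []).getD 0 [] = List.replicate 26 (0 : Int) from rfl,
      List.getD_replicate _ hc]
    rfl
  | append_singleton l s ih =>
    rw [pvPrefix_append]
    rcases Nat.lt_or_ge m (l.length + 1) with hlt | hge
    · rw [List.getD_append _ _ _ _ (by have := pvPrefix_length l; omega), ih (by omega)]
      simp only [pvS]
      rw [List.take_append_of_le_length (by omega)]
    · have hme : m = l.length + 1 := by
        simp only [List.length_append, List.length_cons, List.length_nil] at hm
        omega
      subst hme
      have hlt : l.length < (pvPrefix l).length := by rw [pvPrefix_length]; omega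
      have hlen : ((pvPrefix l).getD l.length (List.replicate 26 0)).length = 26 := by
        rw [List.getD_eq_getElem _ _ hlt]
        exact pvPrefix_cols l _ (List.getElem_mem hlt)
      have hdefd : ((pvPrefix l).getD l.length (List.replicate 26 0)).getD c 0
          = ((pvPrefix l).getD l.length []).getD c 0 := by
        simp only [List.getD]
        rw [List.getElem?_eq_getElem hlt]
        rfl
      rw [show (pvPrefix l ++ [s.toList.foldl
            (fun col x =>
              col.set (pvPyIdx 26 ((x.toNat : Int) - 97))
                (col.getD (pvPyIdx 26 ((x.toNat : Int) - 97)) 0 + 1))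
            ((pvPrefix l).getLastD (List.replicate 26 0))]).getD (l.length + 1) []
          = s.toList.foldl
            (fun col x =>
              col.set (pvPyIdx 26 ((x.toNat : Int) - 97))
                (col.getD (pvPyIdx 26 ((x.toNat : Int) - 97)) 0 + 1))
            ((pvPrefix l).getLastD (List.replicate 26 0)) from by
        rw [List.getD_append_right _ _ _ _ (by have := pvPrefix_length l; omega), pvPrefix_length,
          show l.length + 1 - (l.length + 1) = 0 from by omega]
        rfl]
      rw [pvCol_getD _ _ (by rw [pvLastCol, hlen]; exact hc), pvLastCol, hdefd, ih le_rfl]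
      simp only [pvS]
      rw [List.take_of_length_le (show (l ++ [s]).length ≤ l.length + 1 by simp),
        List.take_of_length_le le_rfl, List.map_append, List.sum_append]
      simp [pvCnt]

-- `tot[x] += 1` loop (A's total phase)
lemma pvSetInc_length (row : List Nat) (tot : List Int) :
    (row.foldl (fun t x => t.set x (t.getD x 0 + 1)) tot).length = tot.length := by
  induction row generalizing tot with
  | nil => rfl
  | cons a t ih => rw [List.foldl_cons, ih, List.length_set]

lemma pvSetInc_getD (row : List Nat) (tot : List Int) {c : Nat} (hc : c < tot.length) :
    (row.foldl (fun t x => t.set x (t.getD x 0 + 1)) tot).getD c 0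
      = tot.getD c 0 + (row.count c : Int) := by
  induction row generalizing tot with
  | nil => simp
  | cons a t ih =>
    rw [List.foldl_cons, ih _ (by rw [List.length_set]; exact hc), List.count_cons]
    by_cases hac : a = c
    · subst hac
      rw [List.getD_eq_getElem _ 0 (by simpa using hc), List.getElem_set_self (by simpa using hc),
        List.getD_eq_getElem _ 0 hc]
      push_cast
      simp
      ring
    · rw [List.getD_eq_getElem _ 0 (by simpa using hc), List.getElem_set_ne hac (by simpa using hc),
        ← List.getD_eq_getElem tot 0 hc]
      simp [hac]

-- `if p(x): tot[x] += 1` loop (B's total phase)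
lemma pvCondInc_length (l : List Nat) (p : Nat → Prop) [DecidablePred p] (tot : List Int) :
    (l.foldl (fun t x => if p x then t.set x (t.getD x 0 + 1) else t) tot).length = tot.length := by
  induction l generalizing tot with
  | nil => rfl
  | cons a t ih =>
    rw [List.foldl_cons, ih]
    split <;> simp [List.length_set]

lemma pvCondInc_getD (l : List Nat) (p : Nat → Prop) [DecidablePred p] (tot : List Int)
    {c : Nat} (hc : c < tot.length) :
    (l.foldl (fun t x => if p x then t.set x (t.getD x 0 + 1) else t) tot).getD c 0
      = tot.getD c 0 + ((l.filter (fun x => decide (p x))).count c : Int) := by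
  induction l generalizing tot with
  | nil => simp
  | cons a t ih =>
    rw [List.foldl_cons, List.filter_cons]
    by_cases hpa : p a
    · rw [if_pos hpa, ih _ (by rw [List.length_set]; exact hc)]
      by_cases hac : a = c
      · subst hac
        rw [List.getD_eq_getElem _ 0 (by simpa using hc), List.getElem_set_self (by simpa using hc),
          List.getD_eq_getElem _ 0 hc]
        simp [hpa]
        ring
      · rw [List.getD_eq_getElem _ 0 (by simpa using hc), List.getElem_set_ne hac (by simpa using hc),
          ← List.getD_eq_getElem tot 0 hc]
        simp [hpa, hac]
    · rw [if_neg hpa, ih _ hc]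
      simp [hpa]

-- a fold whose step adds g a to slot c and preserves length
lemma pvFoldLen {α : Type} (l : List α) (F : List Int → α → List Int)
    (hlen : ∀ t a, (F t a).length = t.length) (tot : List Int) :
    (l.foldl F tot).length = tot.length := by
  induction l generalizing tot with
  | nil => rfl
  | cons a t ih => rw [List.foldl_cons, ih, hlen]

lemma pvFoldAdd {α : Type} (l : List α) (F : List Int → α → List Int) (g : α → Int) (c : Nat)
    (hlen : ∀ t a, (F t a).length = t.length)
    (hval : ∀ t a, c < t.length → (F t a).getD c 0 = t.getD c 0 + g a)
    (tot : List Int) (hc : c < tot.length) :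
    (l.foldl F tot).getD c 0 = tot.getD c 0 + (l.map g).sum := by
  induction l generalizing tot with
  | nil => simp
  | cons a t ih =>
    rw [List.foldl_cons, ih _ (by rw [hlen]; exact hc), hval _ _ hc, List.map_cons, List.sum_cons]
    ring

lemma pvSum_take_drop (xs : List Int) (a m : Nat) :
    ((xs.drop a).take m).sum = (xs.take (a + m)).sum - (xs.take a).sum := by
  rw [show (xs.drop a).take m = (xs.take (a+m)).drop a by rw [List.drop_take]; congr 1; omega]
  have h1 : xs.take (a + m) = (xs.take (a + m)).take a ++ (xs.take (a + m)).drop a :=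
    (List.take_append_drop a _).symm
  have h2 : (xs.take (a + m)).take a = xs.take a := by
    rw [List.take_take]
    congr 1
    omega
  calc ((xs.take (a + m)).drop a).sum
      = ((xs.take (a + m)).take a).sum + ((xs.take (a + m)).drop a).sum - ((xs.take (a+m)).take a).sum := by ring
    _ = (xs.take (a + m)).sum - (xs.take a).sum := by
        rw [← List.sum_append, ← h1, h2]

lemma pvS_succ (research : List String) (c : Nat) {m : Nat} (hm : m < research.length) :
    pvS research c (m + 1) = pvS research c m + pvCnt c (research.getD m "") := by
  unfold pvS
  rw [List.take_succ_eq_append_getElem hm, List.map_append, List.sum_append,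
    List.getD_eq_getElem research "" hm]
  simp

-- the common per-window, per-letter condition and the common value of both totals
def pvTotSpec (research : List String) (n k : Int) (c : Nat) : Int :=
  ((PySem.List.pyRange 0 ((research.length : Int) - n + 1) 1).map
    (fun i => if (k ≤ pvCnt c (research.getD i.toNat "") ∧
        2 * n * k ≤ pvS research c (i.toNat + n.toNat) - pvS research c i.toNat)
      then (1 : Int) else 0)).sum

-- A's final[i] row, with the concrete alpha/issue arguments plugged in
def pvRowFunA (research : List String) (n k : Int) (i : Int) : List Nat :=
  (PySem.List.pyRange 0
      ((((pvIssue (pvAlpha research) k research.length).getD i.toNat []).length : Int)) 1).foldl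
    (fun acc j =>
      (fun acc x =>
        if 2 * n * k ≤ (PySem.List.slice ((pvAlpha research).getD x []) (some i) (some (i + n))).sum
        then acc ++ [x] else acc)
      acc (PySem.List.pyGetD ((pvIssue (pvAlpha research) k research.length).getD i.toNat []) j 0))
    []

lemma pvFinal_eq (research : List String) (n k : Int) :
    pvFinal (pvAlpha research) (pvIssue (pvAlpha research) k research.length)
        (2 * n * k) n research.length
      = (PySem.List.pyRange 0 ((research.length : Int) - n + 1) 1).map (pvRowFunA research n k) := rfl

lemma pvFilter_count (q : Nat → Bool) (l : List Nat) (c : Nat) :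
    (l.filter q).count c = if q c then l.count c else 0 := by
  by_cases h : q c
  · rw [if_pos h, List.count_filter h]
  · rw [if_neg h]
    exact List.count_eq_zero.mpr (fun hm => h (List.of_mem_filter hm))

lemma pvWinBounds {day : Nat} {n i : Int} (hn : 1 ≤ n) (hi0 : 0 ≤ i)
    (hilt : i < (day : Int) - n + 1) :
    i.toNat < day ∧ i.toNat + n.toNat ≤ day ∧ (i + n).toNat = i.toNat + n.toNat := by
  have h1 : (i.toNat : Int) = i := Int.toNat_of_nonneg hi0
  have h2 : (n.toNat : Int) = n := Int.toNat_of_nonneg (by omega)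
  refine ⟨by omega, by omega, ?_⟩
  rw [Int.toNat_add hi0 (by omega)]

lemma pvRowA_count (research : List String) (n k : Int) (hl : pvCharsOk research) (hn : 1 ≤ n)
    {c : Nat} (hc : c < 26) {i : Int} (hi0 : 0 ≤ i)
    (hilt : i < (research.length : Int) - n + 1) :
    ((pvRowFunA research n k i).count c : Int)
      = if (k ≤ pvCnt c (research.getD i.toNat "") ∧
          2 * n * k ≤ pvS research c (i.toNat + n.toNat) - pvS research c i.toNat)
        then 1 else 0 := by
  obtain ⟨hit, hsum, hadd⟩ := pvWinBounds hn hi0 hilt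
  rw [pvRowFunA, PySem.List.foldl_pyRange_zero_pyGetD'
      ((pvIssue (pvAlpha research) k research.length).getD i.toNat []) 0
      (fun acc x =>
        if 2 * n * k ≤ (PySem.List.slice ((pvAlpha research).getD x []) (some i) (some (i + n))).sum
        then acc ++ [x] else acc) [],
    PySem.List.foldl_append_ite_eq_filter
      (fun x => 2 * n * k ≤ (PySem.List.slice ((pvAlpha research).getD x []) (some i) (some (i + n))).sum),
    List.nil_append]
  rw [show (pvIssue (pvAlpha research) k research.length).getD i.toNat []
      = (List.range 26).foldl
          (fun acc j => if k ≤ pvGet2 (pvAlpha research) j i.toNat then acc ++ [j] else acc) []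
    from PySem.List.getD_map_range _ _ _ _ hit]
  rw [PySem.List.foldl_append_ite_eq_filter
      (fun j => k ≤ pvGet2 (pvAlpha research) j i.toNat), List.nil_append]
  rw [pvFilter_count, pvFilter_count]
  have hq : (2 * n * k ≤ (PySem.List.slice ((pvAlpha research).getD c []) (some i) (some (i + n))).sum)
      ↔ (2 * n * k ≤ pvS research c (i.toNat + n.toNat) - pvS research c i.toNat) := by
    rw [pvAlpha_row research hl hc,
      PySem.List.slice_toNat _ hi0 (by omega),
      show (i + n).toNat - i.toNat = n.toNat by omega,
      pvSum_take_drop, ← List.map_take, ← List.map_take]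
    rfl
  have hp : (k ≤ pvGet2 (pvAlpha research) c i.toNat) ↔ (k ≤ pvCnt c (research.getD i.toNat "")) := by
    rw [pvAlpha_get2 research hl hc hit]
  simp only [List.count_range, decide_eq_true_eq]
  by_cases h1 : k ≤ pvCnt c (research.getD i.toNat "") <;>
    by_cases h2 : 2 * n * k ≤ pvS research c (i.toNat + n.toNat) - pvS research c i.toNat
  · rw [if_pos (hq.mpr h2), if_pos (hp.mpr h1), if_pos hc, if_pos ⟨h1, h2⟩]
    rfl
  · rw [if_neg (fun h => h2 (hq.mp h)), if_neg (fun h => h2 h.2)]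
    rfl
  · rw [if_pos (hq.mpr h2), if_neg (fun h => h1 (hp.mp h)), if_neg (fun h => h1 h.1)]
    rfl
  · rw [if_neg (fun h => h2 (hq.mp h)), if_neg (fun h => h1 h.1)]
    rfl


lemma pvTotalA (research : List String) (n k : Int) (hl : pvCharsOk research) (hn : 1 ≤ n)
    {c : Nat} (hc : c < 26) :
    ((pvFinal (pvAlpha research) (pvIssue (pvAlpha research) k research.length)
        (2 * n * k) n research.length).foldl
      (fun tot row => row.foldl (fun tot c => tot.set c (tot.getD c 0 + 1)) tot)
      (List.replicate 26 0)).getD c 0 = pvTotSpec research n k c := by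
  rw [pvFinal_eq, List.foldl_map,
    pvFoldAdd _ _ (fun i => ((pvRowFunA research n k i).count c : Int)) c
      (fun t a => pvSetInc_length _ t)
      (fun t a hct => pvSetInc_getD _ t hct)
      _ (by simp [hc]),
    List.getD_replicate _ hc, pvTotSpec, zero_add]
  apply congrArg
  apply List.map_congr_left
  intro i hi
  obtain ⟨hi0, hilt⟩ := PySem.List.mem_pyRange_one.mp hi
  exact pvRowA_count research n k hl hn hc hi0 hilt

lemma pvCondB_iff (research : List String) (n k : Int) (hn : 1 ≤ n) {c : Nat} (hc : c < 26)
    {i : Int} (hi0 : 0 ≤ i) (hilt : i < (research.length : Int) - n + 1) :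
    (k ≤ ((pvPrefix research).getD (i.toNat + 1) []).getD c 0
          - ((pvPrefix research).getD i.toNat []).getD c 0 ∧
        2 * n * k ≤ ((pvPrefix research).getD (i + n).toNat []).getD c 0
          - ((pvPrefix research).getD i.toNat []).getD c 0)
      ↔ (k ≤ pvCnt c (research.getD i.toNat "") ∧
          2 * n * k ≤ pvS research c (i.toNat + n.toNat) - pvS research c i.toNat) := by
  obtain ⟨hit, hsum, hadd⟩ := pvWinBounds hn hi0 hilt
  rw [pvPrefix_getD research c hc (m := i.toNat + 1) (by omega),
    pvPrefix_getD research c hc (m := i.toNat) (by omega), hadd,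
    pvPrefix_getD research c hc (m := i.toNat + n.toNat) (by omega),
    pvS_succ research c hit]
  constructor
  · intro ⟨a, b⟩
    exact ⟨by omega, b⟩
  · intro ⟨a, b⟩
    exact ⟨by omega, b⟩

lemma pvTotalB (research : List String) (n k : Int) (hn : 1 ≤ n) {c : Nat} (hc : c < 26) :
    ((PySem.List.pyRange 0 ((research.length : Int) - n + 1) 1).foldl
      (fun tot i =>
        (List.range 26).foldl (fun tot c =>
          if k ≤ ((pvPrefix research).getD (i.toNat + 1) []).getD c 0
          - ((pvPrefix research).getD i.toNat []).getD c 0 ∧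
        2 * n * k ≤ ((pvPrefix research).getD (i + n).toNat []).getD c 0
          - ((pvPrefix research).getD i.toNat []).getD c 0
          then tot.set c (tot.getD c 0 + 1) else tot) tot)
      (List.replicate 26 0)).getD c 0 = pvTotSpec research n k c := by
  rw [pvFoldAdd _ _
      (fun i => (((List.range 26).filter (fun c => decide (k ≤ ((pvPrefix research).getD (i.toNat + 1) []).getD c 0
          - ((pvPrefix research).getD i.toNat []).getD c 0 ∧
        2 * n * k ≤ ((pvPrefix research).getD (i + n).toNat []).getD c 0
          - ((pvPrefix research).getD i.toNat []).getD c 0))).count c : Int)) c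
      (fun t a => pvCondInc_length _ _ t)
      (fun t a hct => pvCondInc_getD _ _ t hct)
      _ (by simp [hc]),
    List.getD_replicate _ hc, pvTotSpec, zero_add]
  apply congrArg
  apply List.map_congr_left
  intro i hi
  obtain ⟨hi0, hilt⟩ := PySem.List.mem_pyRange_one.mp hi
  rw [pvFilter_count]
  simp only [List.count_range, decide_eq_true_eq]
  have hiff := pvCondB_iff research n k hn hc hi0 hilt
  by_cases h : (k ≤ ((pvPrefix research).getD (i.toNat + 1) []).getD c 0
          - ((pvPrefix research).getD i.toNat []).getD c 0 ∧
        2 * n * k ≤ ((pvPrefix research).getD (i + n).toNat []).getD c 0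
          - ((pvPrefix research).getD i.toNat []).getD c 0)
  · rw [if_pos h, if_pos hc, if_pos (hiff.mp h)]
    rfl
  · rw [if_neg h, if_neg (fun hx => h (hiff.mpr hx))]
    rfl

-- ===== VERDICT (by name: the statement is the Claim_ definition above) =====
theorem solution_spec : Claim_equal_solution := by
  intro research n k hdom hpre
  obtain ⟨hn, hl'⟩ := hpre
  have hl : pvCharsOk research := by
    simp only [List.all_eq_true, Bool.and_eq_true, decide_eq_true_eq] at hl'
    intro s hs ch hch
    exact hl' s hs ch hch
  show solution research n k = solution_alt research n k
  have htot :
      (pvFinal (pvAlpha research) (pvIssue (pvAlpha research) k research.length)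
          (2 * n * k) n research.length).foldl
        (fun tot row => row.foldl (fun tot c => tot.set c (tot.getD c 0 + 1)) tot)
        (List.replicate 26 (0 : Int))
      = (PySem.List.pyRange 0 ((research.length : Int) - n + 1) 1).foldl
        (fun tot i =>
          (List.range 26).foldl (fun tot c =>
            if k ≤ ((pvPrefix research).getD (i.toNat + 1) []).getD c 0
              - ((pvPrefix research).getD i.toNat []).getD c 0 ∧
            2 * n * k ≤ ((pvPrefix research).getD (i + n).toNat []).getD c 0
              - ((pvPrefix research).getD i.toNat []).getD c 0
            then tot.set c (tot.getD c 0 + 1) else tot) tot)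
        (List.replicate 26 (0 : Int)) := by
    have hlenA := pvFoldLen
      (pvFinal (pvAlpha research) (pvIssue (pvAlpha research) k research.length)
        (2 * n * k) n research.length)
      (fun tot row => row.foldl (fun tot c => tot.set c (tot.getD c 0 + 1)) tot)
      (fun t a => pvSetInc_length _ t) (List.replicate 26 (0 : Int))
    have hlenB := pvFoldLen
      (PySem.List.pyRange 0 ((research.length : Int) - n + 1) 1)
      (fun tot i =>
        (List.range 26).foldl (fun tot c =>
          if k ≤ ((pvPrefix research).getD (i.toNat + 1) []).getD c 0
              - ((pvPrefix research).getD i.toNat []).getD c 0 ∧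
            2 * n * k ≤ ((pvPrefix research).getD (i + n).toNat []).getD c 0
              - ((pvPrefix research).getD i.toNat []).getD c 0
          then tot.set c (tot.getD c 0 + 1) else tot) tot)
      (fun t a => pvCondInc_length _ _ t) (List.replicate 26 (0 : Int))
    apply List.ext_getElem (hlenA.trans hlenB.symm)
    intro c h1 h2
    have hc : c < 26 := by
      have e := hlenA
      rw [List.length_replicate] at e
      omega
    have hA := pvTotalA research n k hl hn hc
    have hB := pvTotalB research n k hn hc
    rw [List.getD_eq_getElem _ 0 h1] at hA
    rw [List.getD_eq_getElem _ 0 h2] at hB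
    rw [hA, hB]
  show pvAnswer _ = pvAnswer _
  exact congrArg pvAnswer htot
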